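-- pv_equiv track=rewrite | github.com/JohnyCarrot/mapa-chranenych-oblasti-sr | map/components/diskusia_prispevky.py | zisti_karmu
-- ===== SOURCE A (Python) =====
-- def zisti_karmu(karmy):
--     karma = 0
--     for x in list(karmy.values()):
--         if x =='+':
--             karma+=1
--         elif x=='-':
--             karma-=1
--     return karma
-- ===== SOURCE B (Python) =====
-- def zisti_karmu(karmy):
--     vals = list(karmy.values())
--     return vals.count('+') - vals.count('-')
-- ===== Notes on version B (the rewrite author's own statement) =====
-- stated objective: simpler
-- what changed: Replaced A's single branching accumulator loop with two staged branchless passes: list.count('+') minus list.count('-') over the values.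
import Mathlib
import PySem

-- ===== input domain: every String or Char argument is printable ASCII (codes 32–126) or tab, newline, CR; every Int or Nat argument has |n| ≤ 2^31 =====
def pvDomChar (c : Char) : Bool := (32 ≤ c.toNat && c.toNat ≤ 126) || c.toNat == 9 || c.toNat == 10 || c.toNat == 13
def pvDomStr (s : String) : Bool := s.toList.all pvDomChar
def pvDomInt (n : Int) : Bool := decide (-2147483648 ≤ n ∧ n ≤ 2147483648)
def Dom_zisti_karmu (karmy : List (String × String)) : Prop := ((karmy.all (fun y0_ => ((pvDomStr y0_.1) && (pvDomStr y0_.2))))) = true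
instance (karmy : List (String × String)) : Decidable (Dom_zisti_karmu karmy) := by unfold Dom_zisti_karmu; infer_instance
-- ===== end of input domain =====

-- B replaces A's branching accumulator loop by two staged branchless counting passes over the values; objective: simpler.

-- ===== PORT A =====
-- for x in list(karmy.values()): if x == '+': karma += 1 elif x == '-': karma -= 1
def zisti_karmu (karmy : List (String × String)) : Int :=
  ((PySem.Dict.ofList karmy).values).foldl
    (fun karma x => if x == "+" then karma + 1 else if x == "-" then karma - 1 else karma) 0

-- ===== PORT B =====
-- vals = list(karmy.values()); return vals.count('+') - vals.count('-')
def zisti_karmu_alt (karmy : List (String × String)) : Int :=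
  let vals := (PySem.Dict.ofList karmy).values
  (PySem.List.count vals "+" : Int) - (PySem.List.count vals "-" : Int)

-- ===== PRECONDITION & SPEC =====
def Spec_zisti_karmu (karmy : List (String × String)) (out : Int) : Prop := out = zisti_karmu_alt karmy
instance (karmy : List (String × String)) (out : Int) : Decidable (Spec_zisti_karmu karmy out) := by unfold Spec_zisti_karmu; infer_instance

-- ===== CLAIM (what is proved, stated in full; the proofs are below) =====
def Claim_equal_zisti_karmu : Prop := ∀ (karmy : List (String × String)), Dom_zisti_karmu karmy → Spec_zisti_karmu karmy (zisti_karmu karmy)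

-- ===== LEMMAS AND PROOFS =====

-- A's accumulator loop over any value list counts '+' minus '-'.
theorem foldl_pm_count (vals : List String) (acc : Int) :
    vals.foldl (fun karma x => if x == "+" then karma + 1 else if x == "-" then karma - 1 else karma) acc
      = acc + (vals.count "+" : Int) - (vals.count "-" : Int) := by
  induction vals generalizing acc with
  | nil => simp
  | cons v vs ih =>
    simp only [List.foldl_cons, List.count_cons, ih]
    by_cases h1 : v == "+"
    · simp_all
      omega
    · by_cases h2 : v == "-" <;> simp_all <;> omega

-- ===== VERDICT (by name: the statement is the Claim_ definition above) =====
theorem zisti_karmu_spec : Claim_equal_zisti_karmu := by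
  intro karmy _
  unfold Spec_zisti_karmu zisti_karmu zisti_karmu_alt
  simp only [PySem.List.count_eq, foldl_pm_count]
  omega
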